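-- pv_equiv track=rewrite | github.com/DavidLeoni/makemath | makemath.py | label_python_to_mm
-- ===== SOURCE A (Python) =====
-- MAKE_PREFIX = 'MAKE'
--
-- MAKE_DOT = 'DOT'
--
-- MAKE_HYPHEN = '_'
--
-- MAKE_DOUBLE_HYPHEN = '_2_'
--
-- MAKE_UNDERSCORE = '__'
--
-- def label_python_to_mm(python_label):
--     """ From Metamath book:
--     > Label tokens are used to identify Metamath statements for later reference.
--     > Label tokens may contain only letters, digits, and the three characters period,
--     > hyphen, and underscore:
--     > . - _
--     """
--     if len(python_label) == 0:
--         raise ValueError("Found empty Python label")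
--     ret = []
--     i = 0
--     if python_label.startswith(MAKE_PREFIX):
--         i += len(MAKE_PREFIX)
--     while i < len(python_label):
--         if python_label[i:].startswith(MAKE_DOT):
--             ret.append('.')
--             i += len(MAKE_DOT)
--         elif python_label[i:].startswith(MAKE_UNDERSCORE):
--             ret.append('_')
--             i += len(MAKE_UNDERSCORE)
--         elif python_label[i:].startswith(MAKE_DOUBLE_HYPHEN):
--             ret.append('--')
--             i += len(MAKE_DOUBLE_HYPHEN)
--         elif python_label[i:].startswith(MAKE_HYPHEN):
--             ret.append('-')
--             i += len(MAKE_HYPHEN)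
--         else:
--             ret.append(python_label[i])
--             i += 1
--     return ''.join(ret)
-- ===== SOURCE B (Python) =====
-- MAKE_PREFIX = 'MAKE'
--
-- def label_python_to_mm(python_label):
--     if len(python_label) == 0:
--         raise ValueError("Found empty Python label")
--     body = python_label[len(MAKE_PREFIX):] if python_label.startswith(MAKE_PREFIX) else python_label
--     # 'DOT' shares no character with the underscore tokens, so it can be
--     # rewritten globally up front; then a single-pass 3-state DFA decodes
--     # '__' -> '_', '_2_' -> '--', '_' -> '-' with A's greedy priority.
--     body = body.replace('DOT', '.')
--     out = []
--     state = 0  # 0: normal, 1: just saw '_', 2: just saw '_2'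
--     for c in body:
--         if state == 0:
--             if c == '_':
--                 state = 1
--             else:
--                 out.append(c)
--         elif state == 1:
--             if c == '_':
--                 out.append('_')
--                 state = 0
--             elif c == '2':
--                 state = 2
--             else:
--                 out.append('-')
--                 out.append(c)
--                 state = 0
--         else:
--             if c == '_':
--                 out.append('--')
--                 state = 0
--             else:
--                 out.append('-')
--                 out.append('2')
--                 out.append(c)
--                 state = 0
--     if state == 1:
--         out.append('-')
--     elif state == 2:
--         out.append('-')
--         out.append('2')
--     return ''.join(out)
-- ===== Notes on version B (the rewrite author's own statement) =====
-- stated objective: faster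
-- what changed: A's position-advancing scan that builds a fresh suffix slice and runs four startswith tests at every position is replaced by one global replace of 'DOT' (its characters are disjoint from the underscore tokens) followed by a single left-to-right pass of a 3-state DFA that decodes '__', '_2_' and '_' without slicing or lookahead.
import Mathlib
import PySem

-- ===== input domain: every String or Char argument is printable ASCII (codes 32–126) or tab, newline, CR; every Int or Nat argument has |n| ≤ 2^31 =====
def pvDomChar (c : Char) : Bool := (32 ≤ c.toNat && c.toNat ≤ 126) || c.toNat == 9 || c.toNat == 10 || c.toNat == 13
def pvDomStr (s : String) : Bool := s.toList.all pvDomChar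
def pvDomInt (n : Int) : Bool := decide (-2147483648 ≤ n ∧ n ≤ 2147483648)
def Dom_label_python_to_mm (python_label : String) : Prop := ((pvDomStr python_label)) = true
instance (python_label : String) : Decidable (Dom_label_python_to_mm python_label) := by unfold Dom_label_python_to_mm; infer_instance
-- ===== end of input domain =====

-- B replaces A's per-position suffix-slice scan with one global 'DOT' rewrite plus a
-- single-pass 3-state DFA over the characters (objective: faster, one linear pass).

-- ===== PORT A =====
-- the module constants
def MAKE_PREFIX : List Char := "MAKE".toList
def MAKE_DOT : List Char := "DOT".toList
def MAKE_HYPHEN : List Char := "_".toList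
def MAKE_DOUBLE_HYPHEN : List Char := "_2_".toList
def MAKE_UNDERSCORE : List Char := "__".toList

-- A's while loop: python_label[i:] is the remaining suffix; each branch appends the
-- decoded piece to ret and advances i by the token length (drop on the suffix).
def goA : List Char → List String
  | [] => []
  | c :: rest =>
    if MAKE_DOT.isPrefixOf (c :: rest) then "." :: goA (rest.drop 2)
    else if MAKE_UNDERSCORE.isPrefixOf (c :: rest) then "_" :: goA (rest.drop 1)
    else if MAKE_DOUBLE_HYPHEN.isPrefixOf (c :: rest) then "--" :: goA (rest.drop 2)
    else if MAKE_HYPHEN.isPrefixOf (c :: rest) then "-" :: goA rest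
    else String.ofList [c] :: goA rest
  termination_by l => l.length
  decreasing_by all_goals simp [List.length_drop]

-- A raises ValueError on the empty label (excluded by Pre_); otherwise it strips a
-- leading MAKE and scans the rest, joining the collected pieces.
def label_python_to_mm (python_label : String) : String :=
  let l := python_label.toList
  let body := if MAKE_PREFIX.isPrefixOf l then l.drop MAKE_PREFIX.length else l
  String.join (goA body)

-- ===== PORT B =====
-- hand port of body.replace('DOT', '.'): exact for a nonempty pattern (leftmost
-- non-overlapping occurrences replaced, every other character kept)
def repDOT : List Char → List Char
  | [] => []
  | c :: rest =>
    if MAKE_DOT.isPrefixOf (c :: rest) then '.' :: repDOT (rest.drop 2)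
    else c :: repDOT rest
  termination_by l => l.length
  decreasing_by all_goals simp [List.length_drop]

-- B's for-loop: state 0 = normal, 1 = just saw '_', 2 = just saw '_2'; the nil case is
-- the flush after the loop.
def dfaB (st : Nat) : List Char → List Char
  | [] => if st == 1 then ['-'] else if st == 2 then ['-', '2'] else []
  | c :: rest =>
    if st == 0 then
      if c == '_' then dfaB 1 rest else c :: dfaB 0 rest
    else if st == 1 then
      if c == '_' then '_' :: dfaB 0 rest
      else if c == '2' then dfaB 2 rest
      else '-' :: c :: dfaB 0 rest
    else
      if c == '_' then '-' :: '-' :: dfaB 0 rest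
      else '-' :: '2' :: c :: dfaB 0 rest

def label_python_to_mm_alt (python_label : String) : String :=
  let l := python_label.toList
  let body := if MAKE_PREFIX.isPrefixOf l then l.drop MAKE_PREFIX.length else l
  String.ofList (dfaB 0 (repDOT body))

-- ===== PRECONDITION & SPEC =====
-- Pre_ excludes exactly the empty string, on which A raises ValueError.
def Pre_label_python_to_mm (python_label : String) : Prop := python_label ≠ ""
instance (python_label : String) : Decidable (Pre_label_python_to_mm python_label) := by
  unfold Pre_label_python_to_mm; infer_instance
def pvWitness_label_python_to_mm : String := "MAKE_2_plus_DOT"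

def Spec_label_python_to_mm (python_label : String) (out : String) : Prop := out = label_python_to_mm_alt python_label
instance (python_label : String) (out : String) : Decidable (Spec_label_python_to_mm python_label out) := by unfold Spec_label_python_to_mm; infer_instance

-- ===== CLAIM (what is proved, stated in full; the proofs are below) =====
def Claim_equal_label_python_to_mm : Prop := ∀ (python_label : String), Dom_label_python_to_mm python_label → Pre_label_python_to_mm python_label → Spec_label_python_to_mm python_label (label_python_to_mm python_label)

-- ===== LEMMAS AND PROOFS =====

-- the flattening of A's collected pieces
def joinT (ss : List String) : List Char := (ss.map String.toList).flatten

theorem join_eq_joinT (ss : List String) : String.join ss = String.ofList (joinT ss) := by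
  rw [joinT, ← String.toList_join, String.ofList_toList]
  

-- repDOT keeps a non-'D' head
theorem rep_pass (c : Char) (t : List Char) (h : ¬ MAKE_DOT.isPrefixOf (c :: t) = true) :
    repDOT (c :: t) = c :: repDOT t := by
  simp [repDOT, h]

theorem rep_head_ne (t : List Char) (a : Char) (hD : a ≠ 'D') (hdot : a ≠ '.')
    (h : t.head? ≠ some a) : (repDOT t).head? ≠ some a := by
  cases t with
  | nil => simp [repDOT]
  | cons c r =>
    by_cases hp : MAKE_DOT.isPrefixOf (c :: r) = true
    · simp [repDOT, hp]
      exact fun he => hdot he.symm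
    · simp [repDOT, hp]
      simpa using h

-- running the DFA from state 1 / state 2 when the next character cannot extend the token
theorem dfa1_flush (t : List Char) (h1 : t.head? ≠ some '_') (h2 : t.head? ≠ some '2') :
    dfaB 1 t = '-' :: dfaB 0 t := by
  cases t with
  | nil => simp [dfaB]
  | cons c r =>
    have hc1 : c ≠ '_' := by simpa using h1
    have hc2 : c ≠ '2' := by simpa using h2
    simp [dfaB, hc1, hc2]

theorem dfa2_flush (t : List Char) (h1 : t.head? ≠ some '_') :
    dfaB 2 t = '-' :: '2' :: dfaB 0 t := by
  cases t with
  | nil => simp [dfaB]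
  | cons c r =>
    have hc1 : c ≠ '_' := by simpa using h1
    simp [dfaB, hc1]

theorem main_core (n : Nat) : ∀ l : List Char, l.length ≤ n → joinT (goA l) = dfaB 0 (repDOT l) := by
  induction n with
  | zero =>
    intro l hl
    have : l = [] := by cases l <;> simp_all
    subst this
    simp [goA, repDOT, dfaB, joinT]
  | succ n ih =>
    intro l hl
    cases l with
    | nil => simp [goA, repDOT, dfaB, joinT]
    | cons c rest =>
      by_cases hD : MAKE_DOT.isPrefixOf (c :: rest) = true
      · -- 'DOT' token
        have hshape : c :: rest = 'D' :: 'O' :: 'T' :: (rest.drop 2) := by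
          rw [List.isPrefixOf_iff_prefix] at hD
          obtain ⟨t, ht⟩ := hD
          simp [MAKE_DOT] at ht
          obtain ⟨rfl, rfl⟩ := ht
          rfl
        obtain ⟨rfl, hrest⟩ : c = 'D' ∧ rest = 'O' :: 'T' :: (rest.drop 2) := by
          simpa using hshape
        rw [hrest]
        have hlen : (rest.drop 2).length ≤ n := by
          simp at hl ⊢
          omega
        simp only [goA, repDOT, MAKE_DOT, MAKE_UNDERSCORE, MAKE_DOUBLE_HYPHEN, MAKE_HYPHEN,
          List.isPrefixOf, joinT, dfaB]
        simp [joinT, dfaB, ← ih _ hlen]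
      · by_cases hU : c = '_'
        · subst hU
          cases rest with
          | nil =>
            simp [goA, repDOT, dfaB, joinT, MAKE_DOT, MAKE_UNDERSCORE, MAKE_DOUBLE_HYPHEN,
              MAKE_HYPHEN, List.isPrefixOf]
          | cons c2 r2 =>
            by_cases h2 : c2 = '_'
            · -- '__' token
              subst h2
              have hlen : r2.length ≤ n := by simp at hl; omega
              rw [rep_pass _ _ (by simp [MAKE_DOT]), rep_pass _ _ (by simp [MAKE_DOT])]
              simp only [goA, MAKE_DOT, MAKE_UNDERSCORE, MAKE_DOUBLE_HYPHEN, MAKE_HYPHEN,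
                List.isPrefixOf]
              simp [joinT, dfaB, ← ih _ hlen]
            · by_cases h22 : c2 = '2'
              · subst h22
                cases r2 with
                | nil =>
                  simp [goA, repDOT, dfaB, joinT, MAKE_DOT, MAKE_UNDERSCORE, MAKE_DOUBLE_HYPHEN,
                    MAKE_HYPHEN, List.isPrefixOf]
                | cons c3 r3 =>
                  by_cases h3 : c3 = '_'
                  · -- '_2_' token
                    subst h3
                    have hlen : r3.length ≤ n := by simp at hl; omega
                    rw [rep_pass _ _ (by simp [MAKE_DOT]), rep_pass _ _ (by simp [MAKE_DOT]),
                      rep_pass _ _ (by simp [MAKE_DOT])]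
                    simp only [goA, MAKE_DOT, MAKE_UNDERSCORE, MAKE_DOUBLE_HYPHEN, MAKE_HYPHEN,
                      List.isPrefixOf]
                    simp [joinT, dfaB, ← ih _ hlen]
                  · -- lone '_' then '2' then a char that is not '_'
                    have hlen : (c3 :: r3).length ≤ n := by simp at hl; simp; omega
                    have hhd : ((repDOT (c3 :: r3)).head? ≠ some '_') :=
                      rep_head_ne _ _ (by decide) (by decide) (by simpa using h3)
                    have hA : goA ('_' :: '2' :: c3 :: r3) = "-" :: goA ('2' :: c3 :: r3) := by
                      conv_lhs => rw [goA.eq_def]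
                      simp [MAKE_DOT, MAKE_UNDERSCORE, MAKE_DOUBLE_HYPHEN, MAKE_HYPHEN,
                        List.isPrefixOf, Ne.symm h3]
                    have hA2 : goA ('2' :: c3 :: r3) = String.ofList ['2'] :: goA (c3 :: r3) := by
                      conv_lhs => rw [goA.eq_def]
                      simp [MAKE_DOT, MAKE_UNDERSCORE, MAKE_DOUBLE_HYPHEN, MAKE_HYPHEN,
                        List.isPrefixOf]
                    rw [rep_pass _ _ (by simp [MAKE_DOT]), rep_pass _ _ (by simp [MAKE_DOT]),
                      hA, hA2]
                    simp [joinT, dfaB, dfa2_flush _ hhd, ← ih _ hlen]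
              · -- lone '_' then a char that is neither '_' nor '2'
                have hlen : (c2 :: r2).length ≤ n := by simp at hl; simp; omega
                have hhd1 : ((repDOT (c2 :: r2)).head? ≠ some '_') :=
                  rep_head_ne _ _ (by decide) (by decide) (by simpa using h2)
                have hhd2 : ((repDOT (c2 :: r2)).head? ≠ some '2') :=
                  rep_head_ne _ _ (by decide) (by decide) (by simpa using h22)
                have hA : goA ('_' :: c2 :: r2) = "-" :: goA (c2 :: r2) := by
                  conv_lhs => rw [goA.eq_def]
                  simp [MAKE_DOT, MAKE_UNDERSCORE, MAKE_DOUBLE_HYPHEN, MAKE_HYPHEN,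
                    List.isPrefixOf, Ne.symm h2, Ne.symm h22]
                rw [rep_pass _ _ (by simp [MAKE_DOT]), hA]
                simp [joinT, dfaB, dfa1_flush _ hhd1 hhd2, ← ih _ hlen]
        · -- ordinary character
          have hlen : rest.length ≤ n := by simp at hl; omega
          have hDc : ¬('D' = c ∧ ['O', 'T'] <+: rest) := by
            rintro ⟨rfl, hp⟩
            exact hD (by simpa [MAKE_DOT, List.isPrefixOf_iff_prefix, List.cons_prefix_cons] using hp)
          have hA : goA (c :: rest) = String.ofList [c] :: goA rest := by
            conv_lhs => rw [goA.eq_def]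
            simp [MAKE_DOT, MAKE_UNDERSCORE, MAKE_DOUBLE_HYPHEN, MAKE_HYPHEN,
              List.isPrefixOf, hDc, Ne.symm hU]
          rw [rep_pass _ _ hD, hA]
          simp [joinT, dfaB, hU, ← ih _ hlen]

-- ===== VERDICT (by name: the statement is the Claim_ definition above) =====
theorem label_python_to_mm_spec : Claim_equal_label_python_to_mm := by
  intro s _ _
  unfold Spec_label_python_to_mm label_python_to_mm label_python_to_mm_alt
  simp only
  rw [join_eq_joinT, main_core (s.toList.length) _ (by split <;> simp)]
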